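-- pv_equiv track=rewrite | github.com/guillaume-sagazan/test | function_extraction.py | adapt_list_compare_to_reference_list
-- ===== SOURCE A (Python) =====
-- from typing import Union, List, Any
--
-- def adapt_list_compare_to_reference_list(
--         header_list: int,
--         list_to_adapt: List[Any],
--         list_of_list_reference: List[Any]
--         ) -> List[Any]:
--     """Create a new list with the same length as the list of reference """
--     length_reference = len(header_list)
--     nbr_elmnt_to_complete = length_reference - len(list_to_adapt)
--     if  list_of_list_reference != [] and len(list_of_list_reference[-1]) != length_reference:
--         list_to_adapt = adapt_list_compare_to_reference_list(
--             header_list, list_to_adapt, list_of_list_reference[:-1])[1:]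
--         return list_to_adapt
--     else:
--         if  list_of_list_reference != []:
--             list_to_adapt = list_of_list_reference[-1][0:nbr_elmnt_to_complete] + list_to_adapt
--     return list_to_adapt
-- ===== SOURCE B (Python) =====
-- from typing import List, Any
--
-- def adapt_list_compare_to_reference_list(
--         header_list: int,
--         list_to_adapt: List[Any],
--         list_of_list_reference: List[Any]
--         ) -> List[Any]:
--     n = len(header_list)
--     # scan the reference lists from the end, counting trailing length-mismatches
--     k = 0
--     for ref in reversed(list_of_list_reference):
--         if len(ref) == n:
--             break
--         k += 1
--     i = len(list_of_list_reference) - k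
--     if i > 0:
--         base = list_of_list_reference[i - 1][0:n - len(list_to_adapt)] + list_to_adapt
--     else:
--         base = list_to_adapt
--     return base[k:]
-- ===== Notes on version B (the rewrite author's own statement) =====
-- stated objective: faster
-- what changed: Replaced A's recursive backtracking (one recursive call per trailing mismatched reference list, each rebuilding and re-slicing the result) by a single backward scan that counts the trailing reference lists whose length differs from len(header_list), then one slice/prepend and one final slice.
import Mathlib
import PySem

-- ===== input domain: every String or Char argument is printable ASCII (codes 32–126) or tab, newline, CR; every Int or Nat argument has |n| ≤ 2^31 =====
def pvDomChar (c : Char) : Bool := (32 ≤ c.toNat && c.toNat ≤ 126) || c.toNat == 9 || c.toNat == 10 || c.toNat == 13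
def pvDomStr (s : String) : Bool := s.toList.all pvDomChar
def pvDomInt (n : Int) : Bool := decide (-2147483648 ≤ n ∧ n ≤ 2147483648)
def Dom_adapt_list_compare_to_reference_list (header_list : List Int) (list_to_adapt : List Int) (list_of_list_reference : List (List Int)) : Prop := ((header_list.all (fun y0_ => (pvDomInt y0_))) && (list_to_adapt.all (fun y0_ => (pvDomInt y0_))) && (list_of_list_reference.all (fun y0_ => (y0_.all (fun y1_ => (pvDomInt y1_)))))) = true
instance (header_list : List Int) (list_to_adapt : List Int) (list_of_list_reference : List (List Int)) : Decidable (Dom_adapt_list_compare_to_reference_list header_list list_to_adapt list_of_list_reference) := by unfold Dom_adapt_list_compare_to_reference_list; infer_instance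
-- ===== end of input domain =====

-- B replaces A's O(m·n) recursive backtracking over the reference lists by one backward
-- scan counting trailing length-mismatches followed by a single slice (objective: faster).

-- ===== PORT A =====
-- literal transliteration of A's recursion: refs[-1] / refs[:-1] via getLast? / dropLast,
-- the slices [1:] and [0:nbr] via PySem.List.slice
def adapt_list_compare_to_reference_list (header_list : List Int) (list_to_adapt : List Int) (list_of_list_reference : List (List Int)) : List Int :=
  let length_reference : Int := header_list.length
  let nbr_elmnt_to_complete : Int := length_reference - list_to_adapt.length
  if hne : list_of_list_reference = [] then
    list_to_adapt
  else if ((list_of_list_reference.getLast hne).length : Int) ≠ length_reference then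
    PySem.List.slice
      (adapt_list_compare_to_reference_list header_list list_to_adapt list_of_list_reference.dropLast)
      (some 1) none
  else
    PySem.List.slice (list_of_list_reference.getLast hne) (some 0) (some nbr_elmnt_to_complete)
      ++ list_to_adapt
termination_by list_of_list_reference.length
decreasing_by
  have := List.length_pos_iff.mpr hne
  simp [List.length_dropLast]; omega

-- ===== PORT B =====
-- backward scan (takeWhile over the reversed list) counts k trailing mismatched reference
-- lists; then one slice/prepend and one drop
def adapt_list_compare_to_reference_list_alt (header_list : List Int) (list_to_adapt : List Int) (list_of_list_reference : List (List Int)) : List Int :=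
  let n := header_list.length
  let k := (list_of_list_reference.reverse.takeWhile (fun r => r.length != n)).length
  if hi : 0 < list_of_list_reference.length - k then
    List.drop k
      (PySem.List.slice (list_of_list_reference[list_of_list_reference.length - k - 1]'(by omega))
        (some 0) (some ((n : Int) - (list_to_adapt.length : Int))) ++ list_to_adapt)
  else
    List.drop k list_to_adapt

-- ===== PRECONDITION & SPEC =====
def Spec_adapt_list_compare_to_reference_list (header_list : List Int) (list_to_adapt : List Int) (list_of_list_reference : List (List Int)) (out : List Int) : Prop := out = adapt_list_compare_to_reference_list_alt header_list list_to_adapt list_of_list_reference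
instance (header_list : List Int) (list_to_adapt : List Int) (list_of_list_reference : List (List Int)) (out : List Int) : Decidable (Spec_adapt_list_compare_to_reference_list header_list list_to_adapt list_of_list_reference out) := by unfold Spec_adapt_list_compare_to_reference_list; infer_instance

-- ===== CLAIM (what is proved, stated in full; the proofs are below) =====
def Claim_equal_adapt_list_compare_to_reference_list : Prop := ∀ (header_list : List Int) (list_to_adapt : List Int) (list_of_list_reference : List (List Int)), Dom_adapt_list_compare_to_reference_list header_list list_to_adapt list_of_list_reference → Spec_adapt_list_compare_to_reference_list header_list list_to_adapt list_of_list_reference (adapt_list_compare_to_reference_list header_list list_to_adapt list_of_list_reference)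

-- ===== LEMMAS AND PROOFS =====

theorem adapt_equiv (header_list : List Int) (list_to_adapt : List Int) :
    ∀ refs : List (List Int),
      adapt_list_compare_to_reference_list header_list list_to_adapt refs
        = adapt_list_compare_to_reference_list_alt header_list list_to_adapt refs := by
  intro refs
  induction refs using List.reverseRecOn with
  | nil =>
      simp [adapt_list_compare_to_reference_list, adapt_list_compare_to_reference_list_alt]
  | append_singleton xs x ih =>
      have hk : (xs.reverse.takeWhile (fun r => r.length != header_list.length)).length ≤ xs.length := by
        simpa using (List.takeWhile_prefix (l := xs.reverse)
          (p := fun r => r.length != header_list.length)).length_le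
      have hne : xs ++ [x] ≠ [] := by simp
      have hlast : (xs ++ [x]).getLast hne = x := List.getLast_concat
      rw [adapt_list_compare_to_reference_list]
      simp only [dif_neg hne, hlast, List.dropLast_concat]
      by_cases hx : x.length = header_list.length
      · -- matching length: A takes the else branch, B's scan stops immediately (k = 0)
        rw [if_neg (by exact_mod_cast not_not.mpr hx)]
        simp only [adapt_list_compare_to_reference_list_alt, List.reverse_append,
          List.reverse_cons, List.reverse_nil, List.nil_append, List.singleton_append,
          List.takeWhile_cons, hx, bne_self_eq_false]
        simp
      · -- mismatched length: A recurses and drops the head; B counts one more mismatch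
        have hxb : (x.length != header_list.length) = true := by simpa using hx
        rw [if_pos (by exact_mod_cast hx)]
        rw [ih, PySem.List.slice_from_one]
        show (adapt_list_compare_to_reference_list_alt header_list list_to_adapt xs).tail = _
        simp only [adapt_list_compare_to_reference_list_alt, List.reverse_append,
          List.reverse_cons, List.reverse_nil, List.nil_append, List.singleton_append,
          List.takeWhile_cons, hxb, if_pos, List.length_cons, List.length_append,
          List.length_nil, Nat.zero_add]
        set k := (xs.reverse.takeWhile (fun r => r.length != header_list.length)).length with hkdef
        by_cases hpos : 0 < xs.length - k
        · rw [dif_pos hpos, dif_pos (by simp; omega)]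
          have hlt : xs.length - k - 1 < xs.length := by omega
          have hget : (xs ++ [x])[xs.length + 1 - (k + 1) - 1]'(by simp; omega)
              = xs[xs.length - k - 1]'hlt := by
            have hidx : xs.length + 1 - (k + 1) - 1 = xs.length - k - 1 := by omega
            simp only [hidx]
            exact List.getElem_append_left hlt
          rw [hget, ← List.tail_drop]
        · rw [dif_neg hpos, dif_neg (by simp; omega)]
          rw [← List.tail_drop]

-- ===== VERDICT (by name: the statement is the Claim_ definition above) =====
theorem adapt_list_compare_to_reference_list_spec : Claim_equal_adapt_list_compare_to_reference_list := by
  intro h l refs _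
  exact adapt_equiv h l refs
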